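-- pv_equiv track=rewrite | github.com/Gioack/First_100_Problems_Project_Euler.py | P68_Magic_5-gon_ring.py | get_all_arrangements_to_make
-- ===== SOURCE A (Python) =====
-- def get_all_arrangements_to_make(n):
--     arrangements = list()
--     for a in range(1, 11):
--         for b in range(1, 11):
--             for c in range(1, 11):
--                 if (a+b+c == n):
--                     arrangements.append([a, b, c])
--     return arrangements
-- ===== SOURCE B (Python) =====
-- def get_all_arrangements_to_make(n):
--     return [[a, b, n - a - b]
--             for a in range(1, 11)
--             for b in range(max(1, n - a - 10), min(10, n - a - 1) + 1)]
-- ===== Notes on version B (the rewrite author's own statement) =====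
-- stated objective: simpler
-- what changed: The nested scan-and-filter over b and c is replaced by a flat comprehension: for each a, b ranges directly over the interval [max(1,n-a-10), min(10,n-a-1)] in which a valid triple exists and c is computed as the complement n-a-b, so no filtering loop remains.
import Mathlib
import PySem

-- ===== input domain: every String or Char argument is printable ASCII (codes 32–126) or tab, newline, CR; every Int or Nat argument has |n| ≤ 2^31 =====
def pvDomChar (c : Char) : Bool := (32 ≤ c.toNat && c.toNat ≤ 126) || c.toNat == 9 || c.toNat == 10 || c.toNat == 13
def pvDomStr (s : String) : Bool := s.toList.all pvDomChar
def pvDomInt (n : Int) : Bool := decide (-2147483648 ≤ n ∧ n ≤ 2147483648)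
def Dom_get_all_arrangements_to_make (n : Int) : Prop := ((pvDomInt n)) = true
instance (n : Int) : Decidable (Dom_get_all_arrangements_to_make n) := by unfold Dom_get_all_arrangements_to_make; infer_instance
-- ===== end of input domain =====

-- B builds the result as one flat comprehension: for each a, b ranges directly over the
-- interval of b-values admitting a valid triple and c is the complement n-a-b (simpler).

-- ===== PORT A =====
def get_all_arrangements_to_make (n : Int) : List (List Int) :=
  List.foldl (fun arrangements a =>
    List.foldl (fun arrangements b =>
      List.foldl (fun arrangements c =>
        if a + b + c = n then arrangements ++ [[a, b, c]] else arrangements)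
        arrangements (PySem.List.pyRange 1 11 1))
      arrangements (PySem.List.pyRange 1 11 1))
    [] (PySem.List.pyRange 1 11 1)

-- ===== PORT B =====
def get_all_arrangements_to_make_alt (n : Int) : List (List Int) :=
  (PySem.List.pyRange 1 11 1).flatMap (fun a =>
    (PySem.List.pyRange (max 1 (n - a - 10)) (min 10 (n - a - 1) + 1) 1).map
      (fun b => [a, b, n - a - b]))

-- ===== PRECONDITION & SPEC =====
def Spec_get_all_arrangements_to_make (n : Int) (out : List (List Int)) : Prop := out = get_all_arrangements_to_make_alt n
instance (n : Int) (out : List (List Int)) : Decidable (Spec_get_all_arrangements_to_make n out) := by unfold Spec_get_all_arrangements_to_make; infer_instance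

-- ===== CLAIM (what is proved, stated in full; the proofs are below) =====
def Claim_equal_get_all_arrangements_to_make : Prop := ∀ (n : Int), Dom_get_all_arrangements_to_make n → Spec_get_all_arrangements_to_make n (get_all_arrangements_to_make n)

-- ===== LEMMAS AND PROOFS =====

lemma pyRange_1_11 : PySem.List.pyRange 1 11 1 = [1,2,3,4,5,6,7,8,9,10] := by decide

-- A's inner loop over c collects exactly the unique complement when it is in range.
lemma inner_loop_eq (n a b : Int) (acc : List (List Int)) :
    List.foldl (fun arrangements c =>
      if a + b + c = n then arrangements ++ [[a, b, c]] else arrangements)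
      acc (PySem.List.pyRange 1 11 1)
    = if 1 ≤ n - a - b ∧ n - a - b ≤ 10 then acc ++ [[a, b, n - a - b]] else acc := by
  rw [pyRange_1_11]
  by_cases h : 1 ≤ n - a - b ∧ n - a - b ≤ 10
  · obtain ⟨h1, h2⟩ := h
    have hn : n = a + b + (n - a - b) := by ring
    set k := n - a - b with hk
    rw [if_pos ⟨h1, h2⟩]
    clear_value k
    subst hn
    interval_cases k <;> simp [List.foldl]
  · rw [if_neg h]
    push Not at h
    simp only [List.foldl]
    rw [if_neg (by omega), if_neg (by omega), if_neg (by omega), if_neg (by omega),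
        if_neg (by omega), if_neg (by omega), if_neg (by omega), if_neg (by omega),
        if_neg (by omega), if_neg (by omega)]

-- The b-values of 1..10 passing A's filter are exactly B's direct interval.
lemma filter_eq_range (m : Int) :
    ([1,2,3,4,5,6,7,8,9,10] : List Int).filter (fun b => decide (1 ≤ m - b ∧ m - b ≤ 10))
    = PySem.List.pyRange (max 1 (m - 10)) (min 10 (m - 1) + 1) 1 := by
  by_cases h : 2 ≤ m ∧ m ≤ 20
  · obtain ⟨h1, h2⟩ := h
    interval_cases m <;> decide
  · have hz : ((min 10 (m - 1) + 1) - max 1 (m - 10)).toNat = 0 := by omega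
    rw [PySem.List.pyRange_one, hz]
    simp only [List.range_zero, List.map_nil]
    rw [List.filter_eq_nil_iff]
    intro b hb
    have hb' : 1 ≤ b ∧ b ≤ 10 := by fin_cases hb <;> omega
    simp only [decide_eq_true_eq]
    omega

-- A's middle loop over b, with the c-loop collapsed, collects exactly B's block for a.
lemma mid_loop_eq (n a : Int) (acc : List (List Int)) :
    List.foldl (fun arrangements b =>
      List.foldl (fun arrangements c =>
        if a + b + c = n then arrangements ++ [[a, b, c]] else arrangements)
        arrangements (PySem.List.pyRange 1 11 1))
      acc (PySem.List.pyRange 1 11 1)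
    = acc ++ (PySem.List.pyRange (max 1 (n - a - 10)) (min 10 (n - a - 1) + 1) 1).map
        (fun b => [a, b, n - a - b]) := by
  refine Eq.trans (PySem.List.foldl_congr_mem _ _
        (fun acc b => if 1 ≤ n - a - b ∧ n - a - b ≤ 10 then acc ++ [[a, b, n - a - b]] else acc) _
        (fun acc b _ => inner_loop_eq n a b acc)) ?_
  rw [PySem.List.foldl_append_ite, pyRange_1_11, filter_eq_range (n - a)]

-- ===== VERDICT (by name: the statement is the Claim_ definition above) =====
theorem get_all_arrangements_to_make_spec : Claim_equal_get_all_arrangements_to_make := by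
  intro n _
  unfold Spec_get_all_arrangements_to_make get_all_arrangements_to_make get_all_arrangements_to_make_alt
  refine Eq.trans (PySem.List.foldl_congr_mem _ _
        (fun acc a => acc ++ (PySem.List.pyRange (max 1 (n - a - 10)) (min 10 (n - a - 1) + 1) 1).map
          (fun b => [a, b, n - a - b])) _
        (fun acc a _ => mid_loop_eq n a acc)) ?_
  rw [PySem.List.foldl_append_eq_flatMap]
  simp
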